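-- pv_equiv track=rewrite | github.com/DMontgomery40/football-tactical-workbench | backend/app/training_ai_analysis.py | _interesting_log_lines
-- ===== SOURCE A (Python) =====
-- def _interesting_log_lines(logs: list[str]) -> list[str]:
--     keywords = (
--         "error",
--         "exception",
--         "runtimeerror",
--         "traceback",
--         "warning",
--         "failed",
--         "backward",
--         "nan",
--         "cuda",
--         "mps",
--         "oom",
--         "epoch ",
--         "map50",
--         "precision",
--         "recall",
--         "completed",
--         "stopped",
--         "queued",
--         "manifest",
--     )
--     selected: list[str] = []
--     seen: set[str] = set()
--     for line in reversed(logs):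
--         lowered = line.lower()
--         if any(token in lowered for token in keywords):
--             if line in seen:
--                 continue
--             seen.add(line)
--             selected.append(line)
--         if len(selected) >= 24:
--             break
--     return list(reversed(selected))
-- ===== SOURCE B (Python) =====
-- def _interesting_log_lines(logs: list[str]) -> list[str]:
--     keywords = (
--         "error",
--         "exception",
--         "runtimeerror",
--         "traceback",
--         "warning",
--         "failed",
--         "backward",
--         "nan",
--         "cuda",
--         "mps",
--         "oom",
--         "epoch ",
--         "map50",
--         "precision",
--         "recall",
--         "completed",
--         "stopped",
--         "queued",
--         "manifest",
--     )
--     ordered: dict[str, None] = {}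
--     for line in logs:
--         lowered = line.lower()
--         if any(token in lowered for token in keywords):
--             if line in ordered:
--                 del ordered[line]
--             ordered[line] = None
--     return list(ordered.keys())[-24:]
-- ===== Notes on version B (the rewrite author's own statement) =====
-- stated objective: alternative
-- what changed: Replaces the reverse scan with early break plus a seen-set and a final re-reverse by a single forward pass that maintains an insertion-ordered dict (delete-then-reinsert moves a recurring line to the end, i.e. orders keys by last occurrence) and then takes the last 24 keys with a slice.
import Mathlib
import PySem

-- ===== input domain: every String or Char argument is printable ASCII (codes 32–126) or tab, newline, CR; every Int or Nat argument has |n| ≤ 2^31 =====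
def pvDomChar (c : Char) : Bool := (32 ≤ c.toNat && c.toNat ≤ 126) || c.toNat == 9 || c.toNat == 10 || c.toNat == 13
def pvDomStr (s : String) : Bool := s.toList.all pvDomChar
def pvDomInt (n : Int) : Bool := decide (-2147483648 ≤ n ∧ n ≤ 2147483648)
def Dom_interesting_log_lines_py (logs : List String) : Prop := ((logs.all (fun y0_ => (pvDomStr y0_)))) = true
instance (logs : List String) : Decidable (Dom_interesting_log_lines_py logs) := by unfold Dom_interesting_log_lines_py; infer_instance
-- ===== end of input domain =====

-- B replaces A's reverse scan + seen-set + early break by one forward pass over an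
-- insertion-ordered dict (delete-then-reinsert keeps last-occurrence order) sliced to the
-- last 24 keys; same result, no speed claim (objective: alternative).


-- the keyword tuple, shared literal constant of both programs
def pvKeywords : List String :=
  ["error", "exception", "runtimeerror", "traceback", "warning", "failed", "backward",
   "nan", "cuda", "mps", "oom", "epoch ", "map50", "precision", "recall", "completed",
   "stopped", "queued", "manifest"]

-- ===== PORT A =====
-- the for-loop over reversed(logs) with `continue` and `break`
def pvGoA : List String → List String → PySem.Set String → List String
  | [], selected, _ => selected
  | line :: rest, selected, seen =>
    let lowered := PySem.Str.lower line
    if pvKeywords.any (fun token => PySem.Str.isIn token lowered) then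
      if PySem.Set.contains seen line then
        pvGoA rest selected seen          -- continue
      else
        let seen' := PySem.Set.add seen line
        let selected' := selected ++ [line]
        if 24 ≤ selected'.length then selected'   -- break
        else pvGoA rest selected' seen'
    else
      if 24 ≤ selected.length then selected       -- break
      else pvGoA rest selected seen

def interesting_log_lines_py (logs : List String) : List String :=
  (pvGoA logs.reverse [] PySem.Set.empty).reverse

-- ===== PORT B =====
-- one forward step: del-then-reinsert a matching line so its key moves to the end
def pvStepB (d : PySem.Dict String Unit) (line : String) : PySem.Dict String Unit :=
  let lowered := PySem.Str.lower line
  if pvKeywords.any (fun token => PySem.Str.isIn token lowered) then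
    let d' := if d.contains line then d.erase line else d
    d'.insert line ()
  else d

def interesting_log_lines_py_alt (logs : List String) : List String :=
  PySem.List.slice (PySem.Dict.keys (logs.foldl pvStepB PySem.Dict.empty)) (some (-24)) none

-- ===== PRECONDITION & SPEC =====
def Spec_interesting_log_lines_py (logs : List String) (out : List String) : Prop := out = interesting_log_lines_py_alt logs
instance (logs : List String) (out : List String) : Decidable (Spec_interesting_log_lines_py logs out) := by unfold Spec_interesting_log_lines_py; infer_instance

-- ===== CLAIM (what is proved, stated in full; the proofs are below) =====
def Claim_equal_interesting_log_lines_py : Prop := ∀ (logs : List String), Dom_interesting_log_lines_py logs → Spec_interesting_log_lines_py logs (interesting_log_lines_py logs)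

-- ===== LEMMAS AND PROOFS =====

-- does a line match any keyword? (the test both programs perform)
def pvMatch (line : String) : Bool :=
  pvKeywords.any (fun token => PySem.Str.isIn token (PySem.Str.lower line))

-- matching lines of the list, not in `avoid`, deduplicated keeping the FIRST occurrence
def pvDedup : List String → List String → List String
  | [], _ => []
  | a :: l, avoid =>
    if pvMatch a = true ∧ a ∉ avoid then a :: pvDedup l (a :: avoid)
    else pvDedup l avoid

lemma pvDedup_congr : ∀ (l av av' : List String), (∀ x, x ∈ av ↔ x ∈ av') →
    pvDedup l av = pvDedup l av' := by
  intro l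
  induction l with
  | nil => intro av av' _; rfl
  | cons a l ih =>
    intro av av' h
    simp only [pvDedup, h a]
    split_ifs with hc
    · rw [ih (a :: av) (a :: av') (by intro x; simp [h x])]
    · exact ih av av' h

lemma pvGoA_eq : ∀ (l sel : List String) (seen : PySem.Set String),
    sel.length < 24 → (∀ x, x ∈ seen ↔ x ∈ sel) →
    pvGoA l sel seen = (sel ++ pvDedup l sel).take 24 := by
  intro l
  induction l with
  | nil =>
    intro sel seen hlen _
    simp only [pvGoA, pvDedup, List.append_nil]
    exact (List.take_of_length_le (by omega)).symm
  | cons a l ih =>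
    intro sel seen hlen hseen
    simp only [pvGoA]
    have hcm : (pvKeywords.any fun token => PySem.Str.isIn token (PySem.Str.lower a)) = pvMatch a := rfl
    rw [hcm]
    cases hm : pvMatch a with
    | false =>
      simp only [Bool.false_eq_true, if_false]
      rw [if_neg (by omega)]
      rw [show pvDedup (a :: l) sel = pvDedup l sel by simp [pvDedup, hm]]
      exact ih sel seen hlen hseen
    | true =>
      simp only [if_true]
      by_cases hc : PySem.Set.contains seen a = true
      · have ha : a ∈ sel := (hseen a).mp (by simpa [PySem.Set.contains, List.contains_iff_mem] using hc)
        rw [if_pos hc]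
        rw [show pvDedup (a :: l) sel = pvDedup l sel by simp [pvDedup, ha]]
        exact ih sel seen hlen hseen
      · have ha : a ∉ sel := fun h => hc (by simpa [PySem.Set.contains, List.contains_iff_mem] using (hseen a).mpr h)
        rw [if_neg hc]
        have hded : pvDedup (a :: l) sel = a :: pvDedup l (a :: sel) := by
          simp [pvDedup, hm, ha]
        have hadd : PySem.Set.add seen a = seen ++ [a] := by
          simp only [PySem.Set.add]
          rw [if_neg hc]
        by_cases h24 : 24 ≤ (sel ++ [a]).length
        · simp only [if_pos h24]
          have hl24 : (sel ++ [a]).length = 24 := by simp at h24 ⊢; omega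
          rw [hded, show sel ++ a :: pvDedup l (a :: sel) = (sel ++ [a]) ++ pvDedup l (a :: sel) by simp]
          rw [← hl24, List.take_left]
        · simp only [if_neg h24]
          have hinv : ∀ x, x ∈ PySem.Set.add seen a ↔ x ∈ sel ++ [a] := by
            intro x
            rw [hadd]
            simp [hseen x]
          rw [ih (sel ++ [a]) _ (by simp at h24 ⊢; omega) hinv]
          rw [hded, show sel ++ a :: pvDedup l (a :: sel) = (sel ++ [a]) ++ pvDedup l (a :: sel) by simp]
          rw [pvDedup_congr l (sel ++ [a]) (a :: sel) (by intro x; simp [or_comm])]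

lemma pvStepB_no (d : PySem.Dict String Unit) (a : String) (h : pvMatch a = false) :
    pvStepB d a = d := by
  simp only [pvStepB]
  have hcm : (pvKeywords.any fun token => PySem.Str.isIn token (PySem.Str.lower a)) = pvMatch a := rfl
  rw [hcm, h]
  simp

lemma pvStepB_keys (d : PySem.Dict String Unit) (a : String) (h : pvMatch a = true) :
    (pvStepB d a).keys = (d.keys.filter (fun x => !(x == a))) ++ [a] := by
  simp only [pvMatch] at h
  simp only [pvStepB, h, if_true]
  by_cases hc : d.contains a = true
  · rw [if_pos hc]
    have hce : (d.erase a).contains a = false := by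
      simp [PySem.Dict.erase, PySem.Dict.contains, List.any_filter]
    rw [PySem.Dict.keys_insert_of_not_contains _ _ hce]
    have : (d.erase a).keys = d.keys.filter (fun x => !(x == a)) := by
      simp only [PySem.Dict.erase, PySem.Dict.keys]
      rw [List.filter_map]
      rfl
    rw [this]
  · rw [if_neg hc]
    rw [PySem.Dict.keys_insert_of_not_contains _ _ (by simpa using hc)]
    congr 1
    symm
    rw [List.filter_eq_self]
    intro x hx
    have : a ∉ d.keys := by
      intro hmem
      exact hc ((PySem.Dict.contains_iff_mem_keys d a).mpr hmem)
    simp only [Bool.not_eq_eq_eq_not, Bool.not_true, beq_eq_false_iff_ne, ne_eq]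
    intro he; exact this (he ▸ hx)

lemma pvKeysB : ∀ (l avoid : List String),
    (pvDedup l.reverse avoid).reverse
      = ((l.foldl pvStepB PySem.Dict.empty).keys).filter (fun x => !avoid.contains x) := by
  intro l
  induction l using List.reverseRecOn with
  | nil => intro avoid; simp [pvDedup, PySem.Dict.empty, PySem.Dict.keys]
  | append_singleton l a ih =>
    intro avoid
    rw [List.foldl_append, List.reverse_append]
    simp only [List.foldl, List.reverse_singleton, List.singleton_append]
    cases hm : pvMatch a with
    | false =>
      rw [pvStepB_no _ _ hm]
      rw [show pvDedup (a :: l.reverse) avoid = pvDedup l.reverse avoid by simp [pvDedup, hm]]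
      exact ih avoid
    | true =>
      rw [pvStepB_keys _ _ hm, List.filter_append, List.filter_filter]
      by_cases hav : a ∈ avoid
      · rw [show pvDedup (a :: l.reverse) avoid = pvDedup l.reverse avoid by simp [pvDedup, hav]]
        rw [ih avoid]
        have h1 : [a].filter (fun x => !avoid.contains x) = [] := by
          simp [hav]
        rw [h1, List.append_nil]
        apply List.filter_congr
        intro x hx
        by_cases hxa : x = a
        · subst hxa
          simp [hav]
        · simp [hxa]
      · rw [show pvDedup (a :: l.reverse) avoid = a :: pvDedup l.reverse (a :: avoid) by
            simp [pvDedup, hm, hav]]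
        rw [List.reverse_cons, ih (a :: avoid)]
        have h1 : [a].filter (fun x => !avoid.contains x) = [a] := by
          simp [hav]
        rw [h1]
        congr 1
        apply List.filter_congr
        intro x hx
        simp [Bool.and_comm, beq_eq_decide]

-- ===== VERDICT (by name: the statement is the Claim_ definition above) =====
theorem interesting_log_lines_py_spec : Claim_equal_interesting_log_lines_py := by
  intro logs _
  unfold Spec_interesting_log_lines_py interesting_log_lines_py interesting_log_lines_py_alt
  have hA := pvGoA_eq logs.reverse [] PySem.Set.empty (by simp) (by intro x; simp [PySem.Set.empty])
  have hB := pvKeysB logs []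
  rw [hA]
  simp only [List.nil_append]
  have hB' : pvDedup logs.reverse [] = ((logs.foldl pvStepB PySem.Dict.empty).keys).reverse := by
    have : (pvDedup logs.reverse []).reverse = (logs.foldl pvStepB PySem.Dict.empty).keys := by
      rw [hB]; simp
    calc pvDedup logs.reverse [] = (pvDedup logs.reverse []).reverse.reverse := by simp
      _ = _ := by rw [this]
  rw [hB']
  rw [PySem.List.slice_from_neg_ofNat _ 24 (by norm_num)]
  rw [List.reverse_take]
  simp
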